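-- pv_equiv track=rewrite | github.com/ZLGFelipe/Exercicios-gerais-licoes | Lista de Vetores e Matrizes/exercicio_2__Iniciante.py | Soma_vetores
-- ===== SOURCE A (Python) =====
-- def Soma_vetores(Vetor1: list, Vetor2: list) -> list:
--     Vetor_soma = []
--     maior = max(len(Vetor1), len(Vetor2))
--     for i in range(maior):
--         Valor1 = Vetor1[i] if i < len(Vetor1) else 0
--         Valor2 = Vetor2[i] if i < len(Vetor2) else 0
--
--         Vetor_soma.append(Valor1 +Valor2)
--     return Vetor_soma
-- ===== SOURCE B (Python) =====
-- def Soma_vetores(Vetor1: list, Vetor2: list) -> list: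
--     # Sum only the overlapping prefix (min length); the leftover tail of the
--     # longer vector is appended unchanged -- no zero-padding ever happens.
--     n = min(len(Vetor1), len(Vetor2))
--     return [a + b for a, b in zip(Vetor1, Vetor2)] + Vetor1[n:] + Vetor2[n:]
-- ===== Notes on version B (the rewrite author's own statement) =====
-- stated objective: alternative
-- what changed: Instead of A's padded index loop over range(max(len1,len2)) with two bounds-check conditionals, B sums only the overlapping prefix via zip over min(len1,len2) and appends the unconsumed tail of the longer vector verbatim, never padding with zeros.
import Mathlib
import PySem

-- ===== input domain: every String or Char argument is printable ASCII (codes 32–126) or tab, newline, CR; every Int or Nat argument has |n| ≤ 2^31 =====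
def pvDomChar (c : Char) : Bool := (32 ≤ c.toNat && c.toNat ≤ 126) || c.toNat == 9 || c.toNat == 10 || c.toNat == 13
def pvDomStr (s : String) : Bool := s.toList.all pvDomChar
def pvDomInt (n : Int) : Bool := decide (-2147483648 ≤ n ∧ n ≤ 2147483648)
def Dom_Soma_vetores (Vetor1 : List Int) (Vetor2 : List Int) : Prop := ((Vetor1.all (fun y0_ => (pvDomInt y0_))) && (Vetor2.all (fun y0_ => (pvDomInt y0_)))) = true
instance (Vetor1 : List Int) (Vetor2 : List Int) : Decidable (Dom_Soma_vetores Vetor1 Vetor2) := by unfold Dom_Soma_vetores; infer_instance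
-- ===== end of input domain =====

-- B sums only the overlapping prefix (zip over min length) and appends the
-- leftover tail of the longer vector verbatim; A pads to max length with zeros.

-- ===== PORT A =====
-- literal port: index loop i in range(max(len1,len2)), each step appends the
-- guarded lookups' sum (i < len guards the access, so getD never uses its default)
def Soma_vetores (Vetor1 : List Int) (Vetor2 : List Int) : List Int :=
  (List.range (max Vetor1.length Vetor2.length)).foldl
    (fun acc i =>
      acc ++ [(if i < Vetor1.length then Vetor1.getD i 0 else 0) +
              (if i < Vetor2.length then Vetor2.getD i 0 else 0)]) []

-- ===== PORT B =====
-- port of Source B: zip comprehension (zipWith) over the common prefix, then the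
-- two slices Vetor1[n:] and Vetor2[n:] (n = min length; one slice is empty)
def Soma_vetores_alt (Vetor1 : List Int) (Vetor2 : List Int) : List Int :=
  List.zipWith (fun a b => a + b) Vetor1 Vetor2
    ++ Vetor1.drop (min Vetor1.length Vetor2.length)
    ++ Vetor2.drop (min Vetor1.length Vetor2.length)

-- ===== PRECONDITION & SPEC =====
def Spec_Soma_vetores (Vetor1 : List Int) (Vetor2 : List Int) (out : List Int) : Prop := out = Soma_vetores_alt Vetor1 Vetor2
instance (Vetor1 : List Int) (Vetor2 : List Int) (out : List Int) : Decidable (Spec_Soma_vetores Vetor1 Vetor2 out) := by unfold Spec_Soma_vetores; infer_instance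

-- ===== CLAIM =====
def Claim_equal_Soma_vetores : Prop := ∀ (Vetor1 : List Int) (Vetor2 : List Int), Dom_Soma_vetores Vetor1 Vetor2 → Spec_Soma_vetores Vetor1 Vetor2 (Soma_vetores Vetor1 Vetor2)

-- ===== LEMMAS AND PROOFS =====

-- the per-index value A computes
def pvGfun (V1 V2 : List Int) (i : Nat) : Int :=
  (if i < V1.length then V1.getD i 0 else 0) + (if i < V2.length then V2.getD i 0 else 0)

-- A's fold with append is a map over the range
theorem somaA_eq_map (V1 V2 : List Int) :
    Soma_vetores V1 V2 = (List.range (max V1.length V2.length)).map (pvGfun V1 V2) := by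
  unfold Soma_vetores
  suffices h : ∀ (l : List Nat) (init : List Int),
      l.foldl (fun acc i => acc ++ [(if i < V1.length then V1.getD i 0 else 0) +
        (if i < V2.length then V2.getD i 0 else 0)]) init
      = init ++ l.map (pvGfun V1 V2) by
    simpa using h (List.range (max V1.length V2.length)) []
  intro l
  induction l with
  | nil => intro init; simp
  | cons x xs ih =>
    intro init
    rw [List.foldl_cons, ih]
    simp [pvGfun]

theorem pvGfun_succ_cons_cons (a b : Int) (as_ bs : List Int) :
    pvGfun (a :: as_) (b :: bs) ∘ Nat.succ = pvGfun as_ bs := by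
  funext i; simp [pvGfun, Function.comp]

theorem pvGfun_succ_cons_nil (a : Int) (as_ : List Int) :
    pvGfun (a :: as_) [] ∘ Nat.succ = pvGfun as_ [] := by
  funext i; simp [pvGfun, Function.comp]

theorem pvGfun_succ_nil_cons (b : Int) (bs : List Int) :
    pvGfun [] (b :: bs) ∘ Nat.succ = pvGfun [] bs := by
  funext i; simp [pvGfun, Function.comp]

-- B's recursion pattern (unfolded from its definition)
theorem alt_nil_nil : Soma_vetores_alt [] [] = [] := by
  simp [Soma_vetores_alt]

theorem alt_nil_cons (b : Int) (bs : List Int) :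
    Soma_vetores_alt [] (b :: bs) = (0 + b) :: Soma_vetores_alt [] bs := by
  simp [Soma_vetores_alt]

theorem alt_cons_nil (a : Int) (as_ : List Int) :
    Soma_vetores_alt (a :: as_) [] = (a + 0) :: Soma_vetores_alt as_ [] := by
  simp [Soma_vetores_alt]

theorem alt_cons_cons (a b : Int) (as_ bs : List Int) :
    Soma_vetores_alt (a :: as_) (b :: bs) = (a + b) :: Soma_vetores_alt as_ bs := by
  simp [Soma_vetores_alt, Nat.succ_min_succ]

theorem somaA_map_eq_alt (V1 V2 : List Int) :
    (List.range (max V1.length V2.length)).map (pvGfun V1 V2) = Soma_vetores_alt V1 V2 := by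
  induction V1 generalizing V2 with
  | nil =>
    induction V2 with
    | nil => simp [alt_nil_nil]
    | cons b bs ih =>
      rw [show max ([] : List Int).length (b :: bs).length = bs.length + 1 by simp,
        List.range_succ_eq_map, List.map_cons, List.map_map, pvGfun_succ_nil_cons]
      have ih' : List.map (pvGfun [] bs) (List.range bs.length) = Soma_vetores_alt [] bs := by
        simpa using ih
      rw [ih', alt_nil_cons]
      simp [pvGfun]
  | cons a as_ ih =>
    cases V2 with
    | nil =>
      rw [show max (a :: as_).length ([] : List Int).length = as_.length + 1 by simp,
        List.range_succ_eq_map, List.map_cons, List.map_map, pvGfun_succ_cons_nil]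
      have ih' := ih []
      rw [show max as_.length ([] : List Int).length = as_.length by simp] at ih'
      rw [ih', alt_cons_nil]
      simp [pvGfun]
    | cons b bs =>
      rw [show max (a :: as_).length (b :: bs).length = max as_.length bs.length + 1 by
          simp [Nat.succ_max_succ],
        List.range_succ_eq_map, List.map_cons, List.map_map, pvGfun_succ_cons_cons,
        ih, alt_cons_cons]
      simp [pvGfun]

-- ===== VERDICT =====
theorem Soma_vetores_spec : Claim_equal_Soma_vetores := by
  intro V1 V2 _
  unfold Spec_Soma_vetores
  rw [somaA_eq_map, somaA_map_eq_alt]
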